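-- pv_equiv track=rewrite | github.com/ADicksonLab/wepy | src/wepy/analysis/distributed.py | _by_traj_to_multidimensional
-- ===== SOURCE A (Python) =====
-- from collections import defaultdict
--
-- def _by_traj_to_multidimensional(traj_d):
--     """Convert a dictionary of keys (run_idx, traj_idx) and values (of
--     dimension val_dim) as arrays to a list of lists of the value
--     arrays.
--
--     """
--
--     # get all of the unique run_idxs and sort them
--     run_idxs = sorted(list(set([traj_id[0] for traj_id in traj_d.keys()])))
--
--     # then get which trajectories each run has
--     run_trajs = defaultdict(list)
--     for run_idx, traj_idx in traj_d.keys():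
--         run_trajs[run_idx].append(traj_idx)
--
--     for run_idx in run_trajs.keys():
--         # sort the traj indices (these are unique already within the
--         # run)
--         run_trajs[run_idx] = sorted(list(run_trajs[run_idx]))
--
--     # then just iterate in order over the run_idxs and inside each the
--     # traj indices, as we build these add them to the big structure
--     runs_arr = []
--     for run_idx in run_idxs:
--         run_arr = []
--         for traj_idx in run_trajs[run_idx]:
--             traj_id = (run_idx, traj_idx)
--             run_arr.append(traj_d[traj_id])
--         runs_arr.append(run_arr)
--
--     return runs_arr
-- ===== SOURCE B (Python) =====
-- from itertools import groupby
--
--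
-- def _by_traj_to_multidimensional(traj_d):
--     """Single global tuple-sort of the keys, then one grouped pass per run."""
--     keys = sorted(traj_d.keys())
--     return [[traj_d[k] for k in group]
--             for _, group in groupby(keys, key=lambda k: k[0])]
-- ===== Notes on version B (the rewrite author's own statement) =====
-- stated objective: idiomatic
-- what changed: Replaces A's set-of-runs + per-run defaultdict accumulation + per-run sorts with one global lexicographic sort of the key list followed by a single itertools.groupby pass over the run index.
import Mathlib
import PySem

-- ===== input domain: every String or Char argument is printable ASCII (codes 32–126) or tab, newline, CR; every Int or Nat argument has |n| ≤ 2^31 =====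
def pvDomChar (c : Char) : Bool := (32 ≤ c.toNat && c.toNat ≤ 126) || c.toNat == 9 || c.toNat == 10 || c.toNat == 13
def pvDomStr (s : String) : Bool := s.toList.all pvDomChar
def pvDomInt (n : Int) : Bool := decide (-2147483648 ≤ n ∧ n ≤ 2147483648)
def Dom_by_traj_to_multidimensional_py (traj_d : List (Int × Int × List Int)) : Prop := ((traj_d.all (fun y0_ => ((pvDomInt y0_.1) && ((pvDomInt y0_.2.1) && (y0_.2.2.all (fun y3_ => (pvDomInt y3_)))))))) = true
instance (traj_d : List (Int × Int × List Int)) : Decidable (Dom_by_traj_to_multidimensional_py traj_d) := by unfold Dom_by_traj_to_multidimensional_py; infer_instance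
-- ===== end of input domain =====

-- B replaces A's set-of-runs + per-run defaultdict + per-run sorts by one global
-- lexicographic key sort followed by a single groupby pass (idiomatic rewrite).

-- ===== PORT A =====
def by_traj_to_multidimensional_py (traj_d : List (Int × Int × List Int)) : List (List (List Int)) :=
  let d : PySem.Dict (Int × Int) (List Int) :=
    PySem.Dict.ofList (traj_d.map (fun p => ((p.1, p.2.1), p.2.2)))
  -- run_idxs = sorted(list(set([traj_id[0] for traj_id in traj_d.keys()])))
  let run_idxs := PySem.List.sorted (PySem.Set.ofList (d.keys.map (fun k => k.1))) (fun x => x)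
  -- run_trajs = defaultdict(list); for run_idx, traj_idx in traj_d.keys(): run_trajs[run_idx].append(traj_idx)
  let run_trajs : PySem.Dict Int (List Int) :=
    d.keys.foldl (fun m k => m.modify k.1 [] (fun l => l ++ [k.2])) PySem.Dict.empty
  -- for run_idx in run_trajs.keys(): run_trajs[run_idx] = sorted(list(run_trajs[run_idx]))
  let run_trajs2 :=
    run_trajs.keys.foldl (fun m r => m.insert r (PySem.List.sorted (m.getD r []) (fun x => x))) run_trajs
  -- the nested append loops
  run_idxs.foldl (fun runs_arr r =>
    runs_arr ++ [(run_trajs2.getD r []).foldl (fun run_arr t => run_arr ++ [d.getD (r, t) []]) []]) []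

-- ===== PORT B =====
-- itertools.groupby over the run index (keys already sorted): consecutive blocks of equal first component
def pyGroupRuns : List (Int × Int) → List (List (Int × Int))
  | [] => []
  | k :: rest =>
      (k :: rest.takeWhile (fun j => j.1 == k.1)) :: pyGroupRuns (rest.dropWhile (fun j => j.1 == k.1))
termination_by S => S.length
decreasing_by
  have := List.length_dropWhile_le (fun j => j.1 == k.1) rest
  simp only [List.length_cons]; omega

def by_traj_to_multidimensional_py_alt (traj_d : List (Int × Int × List Int)) : List (List (List Int)) :=
  let d : PySem.Dict (Int × Int) (List Int) :=
    PySem.Dict.ofList (traj_d.map (fun p => ((p.1, p.2.1), p.2.2)))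
  -- keys = sorted(traj_d.keys())  (tuple comparison = lexicographic)
  let keys := PySem.List.sorted2 d.keys (fun k => k.1) (fun k => k.2)
  -- [[traj_d[k] for k in group] for _, group in groupby(keys, key=lambda k: k[0])]
  (pyGroupRuns keys).map (fun g => g.map (fun k => d.getD k []))

-- ===== PRECONDITION & SPEC =====
def Spec_by_traj_to_multidimensional_py (traj_d : List (Int × Int × List Int)) (out : List (List (List Int))) : Prop := out = by_traj_to_multidimensional_py_alt traj_d
instance (traj_d : List (Int × Int × List Int)) (out : List (List (List Int))) : Decidable (Spec_by_traj_to_multidimensional_py traj_d out) := by unfold Spec_by_traj_to_multidimensional_py; infer_instance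

-- ===== CLAIM (what is proved, stated in full; the proofs are below) =====
def Claim_equal_by_traj_to_multidimensional_py : Prop := ∀ (traj_d : List (Int × Int × List Int)), Dom_by_traj_to_multidimensional_py traj_d → Spec_by_traj_to_multidimensional_py traj_d (by_traj_to_multidimensional_py traj_d)

-- ===== LEMMAS AND PROOFS =====

-- lexicographic strict order on keys (Prop form), and the Bool comparator sorted2 uses
def LexLt (a b : Int × Int) : Prop := a.1 < b.1 ∨ (a.1 = b.1 ∧ a.2 < b.2)

def lexB (a b : Int × Int) : Bool :=
  decide (a.1 < b.1) || (!decide (b.1 < a.1) && decide (a.2 < b.2))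

-- first components of the maximal runs, mirroring pyGroupRuns' recursion
def rFirsts : List (Int × Int) → List Int
  | [] => []
  | k :: rest => k.1 :: rFirsts (rest.dropWhile (fun j => j.1 == k.1))
termination_by S => S.length
decreasing_by
  have := List.length_dropWhile_le (fun j => j.1 == k.1) rest
  simp only [List.length_cons]; omega

theorem lexB_false_iff (a b : Int × Int) : lexB b a = false ↔ (a.1 < b.1 ∨ (a.1 = b.1 ∧ a.2 ≤ b.2)) := by
  simp [lexB]; omega

theorem insertBy_lexB_pairwise (x : Int × Int) (l : List (Int × Int))
    (h : l.Pairwise (fun a b => lexB b a = false)) :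
    (PySem.List.insertBy lexB x l).Pairwise (fun a b => lexB b a = false) := by
  induction l with
  | nil => simp [PySem.List.insertBy]
  | cons y ys ih =>
    rcases List.pairwise_cons.mp h with ⟨hy, hys⟩
    by_cases hb : lexB x y = true
    · rw [PySem.List.insertBy, if_pos hb]
      refine List.Pairwise.cons ?_ (List.Pairwise.cons hy hys)
      intro z hz
      rcases List.mem_cons.mp hz with rfl | hz
      · rw [lexB_false_iff]
        simp [lexB] at hb
        omega
      · have := hy z hz
        rw [lexB_false_iff] at this ⊢
        simp [lexB] at hb
        omega
    · rw [PySem.List.insertBy, if_neg hb]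
      refine List.Pairwise.cons ?_ (ih hys)
      intro z hz
      rw [PySem.List.mem_insertBy] at hz
      rcases hz with rfl | hz
      · simpa using hb
      · exact hy z hz

theorem foldl_insertBy_lexB_pairwise (xs : List (Int × Int)) (acc : List (Int × Int))
    (h : acc.Pairwise (fun a b => lexB b a = false)) :
    (xs.foldl (fun acc x => PySem.List.insertBy lexB x acc) acc).Pairwise (fun a b => lexB b a = false) := by
  induction xs generalizing acc with
  | nil => exact h
  | cons x xs ih => exact ih _ (insertBy_lexB_pairwise x acc h)


theorem sorted2_eq_foldl_lexB (xs : List (Int × Int)) :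
    PySem.List.sorted2 xs (fun k => k.1) (fun k => k.2)
      = xs.foldl (fun acc x => PySem.List.insertBy lexB x acc) [] := rfl

theorem le_of_LexLt {a b : Int × Int} (h : LexLt a b) : a.1 ≤ b.1 := by
  rcases h with h | ⟨h, _⟩ <;> omega

theorem pairwise_LexLt_sorted2 (K : List (Int × Int)) (hnd : K.Nodup) :
    (PySem.List.sorted2 K (fun k => k.1) (fun k => k.2)).Pairwise LexLt := by
  have h1 : (PySem.List.sorted2 K (fun k => k.1) (fun k => k.2)).Pairwise
      (fun a b => lexB b a = false) := by
    rw [sorted2_eq_foldl_lexB]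
    exact foldl_insertBy_lexB_pairwise K [] (by simp)
  have hnd' : (PySem.List.sorted2 K (fun k => k.1) (fun k => k.2)).Nodup :=
    (PySem.List.sorted2_perm K (fun k => k.1) (fun k => k.2) false).nodup_iff.mpr hnd
  refine (h1.and hnd').imp ?_
  rintro a b ⟨hab, hne⟩
  rw [lexB_false_iff] at hab
  rcases hab with h | ⟨h1', h2⟩
  · exact Or.inl h
  · refine Or.inr ⟨h1', lt_of_le_of_ne h2 ?_⟩
    intro he; exact hne (Prod.ext h1' he)

theorem fst_gt_of_mem_dropWhile (r : Int) (l : List (Int × Int))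
    (hp : l.Pairwise LexLt) (hm : ∀ w ∈ l, r ≤ w.1) :
    ∀ w ∈ l.dropWhile (fun j => j.1 == r), r < w.1 := by
  induction l with
  | nil => simp
  | cons y l ih =>
    rcases List.pairwise_cons.mp hp with ⟨hy, hl⟩
    by_cases hb : (y.1 == r) = true
    · rw [List.dropWhile_cons, if_pos hb]
      exact ih hl (fun w hw => hm w (List.mem_cons_of_mem _ hw))
    · rw [List.dropWhile_cons, if_neg hb]
      intro w hw
      have hy1 : r < y.1 :=
        lt_of_le_of_ne (hm y (List.mem_cons_self ..)) (by simp at hb; omega)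
      rcases List.mem_cons.mp hw with rfl | hw
      · exact hy1
      · have := le_of_LexLt (hy w hw); omega

theorem mem_rFirsts_iff (l : List (Int × Int)) (r : Int) :
    r ∈ rFirsts l ↔ r ∈ l.map (fun k => k.1) := by
  induction l using rFirsts.induct with
  | case1 => simp [rFirsts]
  | case2 k rest ih =>
    rw [rFirsts]
    constructor
    · intro h
      rcases List.mem_cons.mp h with rfl | h
      · simp
      · have hsub := ((List.dropWhile_sublist (l := rest) (fun j => j.1 == k.1)).map
          (fun k => k.1)).subset
        simp only [List.map_cons, List.mem_cons]
        exact Or.inr (hsub (ih.mp h))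
    · intro h
      simp only [List.map_cons, List.mem_cons] at h
      rcases h with rfl | h
      · exact List.mem_cons_self ..
      · obtain ⟨w, hw, rfl⟩ := List.mem_map.mp h
        rw [← List.takeWhile_append_dropWhile (p := fun j => j.1 == k.1) (l := rest)] at hw
        rcases List.mem_append.mp hw with hw | hw
        · have := List.mem_takeWhile_imp hw
          simp at this
          simp [this]
        · exact List.mem_cons_of_mem _ (ih.mpr (List.mem_map_of_mem hw))

theorem rFirsts_pairwise_lt (l : List (Int × Int)) (hp : l.Pairwise LexLt) :
    (rFirsts l).Pairwise (· < ·) := by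
  induction l using rFirsts.induct with
  | case1 => simp [rFirsts]
  | case2 k rest ih =>
    rcases List.pairwise_cons.mp hp with ⟨hy, hl⟩
    rw [rFirsts]
    refine List.Pairwise.cons ?_ (ih (hl.sublist (List.dropWhile_sublist _)))
    intro r hr
    obtain ⟨w, hw, rfl⟩ := List.mem_map.mp ((mem_rFirsts_iff _ r).mp hr)
    exact fst_gt_of_mem_dropWhile k.1 rest hl (fun w hw => le_of_LexLt (hy w hw)) w hw

theorem pyGroupRuns_eq_map_filter (S : List (Int × Int)) (hp : S.Pairwise LexLt) :
    pyGroupRuns S = (rFirsts S).map (fun r => S.filter (fun k => k.1 == r)) := by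
  induction S using pyGroupRuns.induct with
  | case1 => simp [pyGroupRuns, rFirsts]
  | case2 k rest ih =>
    rcases List.pairwise_cons.mp hp with ⟨hy, hl⟩
    have hdr : ∀ w ∈ rest.dropWhile (fun j => j.1 == k.1), k.1 < w.1 :=
      fst_gt_of_mem_dropWhile k.1 rest hl (fun w hw => le_of_LexLt (hy w hw))
    have hdp : (rest.dropWhile (fun j => j.1 == k.1)).Pairwise LexLt :=
      hl.sublist (List.dropWhile_sublist _)
    rw [pyGroupRuns, rFirsts, List.map_cons, ih hdp]
    congr 1
    · have hdnil : (rest.dropWhile (fun j => j.1 == k.1)).filter (fun z => z.1 == k.1) = [] :=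
        List.filter_eq_nil_iff.mpr (fun w hw => by have := hdr w hw; simp; omega)
      have hself : (rest.takeWhile (fun j => j.1 == k.1)).filter (fun z => z.1 == k.1)
          = rest.takeWhile (fun j => j.1 == k.1) :=
        List.filter_eq_self.mpr
          (fun w hw => List.mem_takeWhile_imp (p := fun j : Int × Int => j.1 == k.1) hw)
      rw [List.filter_cons_of_pos (by simp)]
      congr 1
      conv_rhs => rw [← List.takeWhile_append_dropWhile (p := fun j => j.1 == k.1) (l := rest)]
      rw [List.filter_append, hself, hdnil, List.append_nil]
    · apply List.map_congr_left
      intro r hr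
      obtain ⟨w, hw, rfl⟩ := List.mem_map.mp ((mem_rFirsts_iff _ r).mp hr)
      have hrk : k.1 < w.1 := hdr w hw
      have htnil : (rest.takeWhile (fun j => j.1 == k.1)).filter (fun z => z.1 == w.1) = [] :=
        List.filter_eq_nil_iff.mpr (fun z hz => by
          have := List.mem_takeWhile_imp (p := fun j : Int × Int => j.1 == k.1) hz
          simp at this ⊢
          omega)
      rw [List.filter_cons_of_neg (by simp; omega)]
      conv_rhs => rw [← List.takeWhile_append_dropWhile (p := fun j => j.1 == k.1) (l := rest)]
      rw [List.filter_append, htnil, List.nil_append]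

theorem getD_foldl_insert_sorted (ks : List Int) :
    ∀ (m : PySem.Dict Int (List Int)) (r : Int), ks.Nodup →
    (ks.foldl (fun m r => m.insert r (PySem.List.sorted (m.getD r []) (fun x => x))) m).getD r []
      = if r ∈ ks then PySem.List.sorted (m.getD r []) (fun x => x) else m.getD r [] := by
  induction ks with
  | nil => simp
  | cons k ks ih =>
    intro m r hnd
    rcases List.nodup_cons.mp hnd with ⟨hk, hnd'⟩
    rw [List.foldl_cons, ih _ _ hnd']
    by_cases hrk : r = k
    · subst hrk
      simp [hk]
    · simp [hrk, PySem.Dict.getD_insert]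

theorem sorted_filter_snd (K S : List (Int × Int)) (hperm : S.Perm K)
    (hlt : S.Pairwise LexLt) (r : Int) :
    PySem.List.sorted ((K.filter (fun k => k.1 == r)).map (fun k => k.2)) (fun x => x)
      = (S.filter (fun k => k.1 == r)).map (fun k => k.2) := by
  apply PySem.List.sorted_eq_of_perm_of_pairwise_lt
  · exact (hperm.filter _).map _
  · rw [List.pairwise_map]
    refine List.Pairwise.imp_of_mem ?_ (hlt.filter _)
    intro a b ha hb hab
    have ha' := List.of_mem_filter ha
    have hb' := List.of_mem_filter hb
    simp at ha' hb'
    rcases hab with h | ⟨_, h⟩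
    · omega
    · exact h

theorem run_idxs_eq (K S : List (Int × Int)) (hperm : S.Perm K) (hlt : S.Pairwise LexLt) :
    PySem.List.sorted (PySem.Set.ofList (K.map (fun k => k.1))) (fun x => x) = rFirsts S := by
  apply PySem.List.sorted_eq_of_perm_of_pairwise_lt
  · rw [List.perm_ext_iff_of_nodup ((rFirsts_pairwise_lt S hlt).imp ne_of_lt)
      (PySem.Set.nodup_ofList _)]
    intro r
    rw [mem_rFirsts_iff, PySem.Set.mem_ofList, (hperm.map (fun k => k.1)).mem_iff]
  · exact rFirsts_pairwise_lt S hlt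

-- ===== VERDICT (by name: the statement is the Claim_ definition above) =====
theorem by_traj_to_multidimensional_py_spec : Claim_equal_by_traj_to_multidimensional_py := by
  intro traj_d _
  unfold Spec_by_traj_to_multidimensional_py by_traj_to_multidimensional_py
    by_traj_to_multidimensional_py_alt
  set d : PySem.Dict (Int × Int) (List Int) :=
    PySem.Dict.ofList (traj_d.map (fun p => ((p.1, p.2.1), p.2.2))) with hd
  have hndK : d.keys.Nodup := PySem.Dict.nodup_keys_ofList _
  have hperm : (PySem.List.sorted2 d.keys (fun k => k.1) (fun k => k.2)).Perm d.keys :=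
    PySem.List.sorted2_perm d.keys (fun k => k.1) (fun k => k.2) false
  have hlt := pairwise_LexLt_sorted2 d.keys hndK
  simp only [PySem.List.foldl_append_singleton_eq_map, List.nil_append]
  rw [run_idxs_eq d.keys _ hperm hlt, pyGroupRuns_eq_map_filter _ hlt, List.map_map]
  apply List.map_congr_left
  intro r hr
  have hrtkeys : (List.foldl (fun m k => m.modify k.1 [] fun l => l ++ [k.2])
      PySem.Dict.empty d.keys).keys = PySem.Set.ofList (d.keys.map (fun k => k.1)) := by
    rw [PySem.Dict.keys_foldl_modify_key]
    simp [PySem.Dict.keys_empty]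
    rfl
  have hrtnodup : (List.foldl (fun m k => m.modify k.1 [] fun l => l ++ [k.2])
      PySem.Dict.empty d.keys).keys.Nodup := by
    rw [hrtkeys]; exact PySem.Set.nodup_ofList _
  have hrmem : r ∈ (List.foldl (fun m k => m.modify k.1 [] fun l => l ++ [k.2])
      PySem.Dict.empty d.keys).keys := by
    rw [hrtkeys, PySem.Set.mem_ofList]
    exact (hperm.map (fun k => k.1)).mem_iff.mp ((mem_rFirsts_iff _ r).mp hr)
  rw [getD_foldl_insert_sorted _ _ r hrtnodup, if_pos hrmem,
    PySem.Dict.getD_foldl_modify_append, PySem.Dict.getD_empty, List.nil_append,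
    sorted_filter_snd d.keys _ hperm hlt r, List.map_map]
  apply List.map_congr_left
  intro k hk
  have hk1 := List.of_mem_filter hk
  simp only [beq_iff_eq] at hk1
  simp only [Function.comp]
  rw [show (r, k.2) = k from Prod.ext hk1.symm rfl]
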